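-- pv_equiv track=rewrite | github.com/mlasitsa/leetcode | Medium/1400.ConstructKPalindromeStrings.py | canConstruct
-- ===== SOURCE A (Python) =====
-- def canConstruct(s: str, k: int) -> bool:
--     '''
--     U - Understand:
--     - I need to determine if it's possible to construct exactly `k` palindromes using all characters in `s`.
--     - A palindrome can have at most one character with an odd frequency in its center.
--     - Key observations:
--         - If the number of odd frequencies is greater than `k`, return False.
--         - If `k` is greater than the length of the string, it's impossible to construct `k` palindromes.
--     - Edge cases:
--         - `k > len(s)`: Impossible, return False.
--         - `k == len(s)`: Always True because each character can form its own palindrome.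
--
--     M - Match:
--     - This problem fits frequency counting:
--         - Count the frequency of each character in the string.
--         - Identify how many characters have odd frequencies.
--         - Compare the count of odd frequencies with `k`.
--
--     P - Plan:
--     1. Handle edge cases:
--         - If `len(s) < k`, return False.
--         - If `len(s) == k`, return True.
--     2. Count character frequencies using a dictionary.
--     3. Count how many characters have odd frequencies (`oddCount`).
--     4. If `oddCount > k`, return False.
--     5. Otherwise, return True.
--
--     I - Implement:
--     '''
--     if len(s) < k:
--         return False
--     if len(s) == k:
--         return True
--
--     freq = {}
--
--     for ch in s:
--         if ch in freq:
--             freq[ch] += 1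
--         else:
--             freq[ch] = 1
--
--     oddCount = 0
--
--     for value in freq.values():
--         if value % 2 != 0:
--             oddCount += 1
--
--     if oddCount > k:
--         return False
--     else:
--         return True
-- ===== SOURCE B (Python) =====
-- def canConstruct(s: str, k: int) -> bool:
--     if len(s) < k:
--         return False
--     if len(s) == k:
--         return True
--     odd = set()
--     for ch in s:
--         if ch in odd:
--             odd.remove(ch)
--         else:
--             odd.add(ch)
--     return len(odd) <= k
-- ===== Notes on version B (the rewrite author's own statement) =====
-- stated objective: simpler
-- what changed: Replaces the frequency dict plus a second loop over its values counting odd frequencies with a single pass that toggles each character's parity in a set; the odd count is just the set's size.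
import Mathlib
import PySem

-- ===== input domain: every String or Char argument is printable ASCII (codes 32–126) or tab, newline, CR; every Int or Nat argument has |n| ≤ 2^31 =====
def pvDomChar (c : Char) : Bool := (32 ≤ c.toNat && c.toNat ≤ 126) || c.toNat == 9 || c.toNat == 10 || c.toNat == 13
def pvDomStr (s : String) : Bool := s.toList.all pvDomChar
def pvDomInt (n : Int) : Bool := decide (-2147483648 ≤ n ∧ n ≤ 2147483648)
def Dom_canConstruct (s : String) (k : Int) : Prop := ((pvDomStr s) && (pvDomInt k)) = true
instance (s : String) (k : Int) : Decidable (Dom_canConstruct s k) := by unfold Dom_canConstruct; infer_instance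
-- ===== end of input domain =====

-- B replaces A's frequency dict + second values loop by one parity-toggling set pass (objective: simpler).
-- ===== PORT A =====
def canConstruct (s : String) (k : Int) : Bool :=
  if PySem.Str.len s < k then false
  else if PySem.Str.len s == k then true
  else
    let freq : PySem.Dict Char Int :=
      s.toList.foldl (fun d ch =>
        if d.contains ch then d.insert ch (d.getD ch 0 + 1)
        else d.insert ch 1) PySem.Dict.empty
    let oddCount : Int :=
      freq.values.foldl (fun acc v => if v % 2 != 0 then acc + 1 else acc) 0
    if oddCount > k then false else true

-- ===== PORT B =====
def canConstruct_alt (s : String) (k : Int) : Bool :=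
  if PySem.Str.len s < k then false
  else if PySem.Str.len s == k then true
  else
    -- 'odd.remove(ch)' under the 'ch in odd' guard is exactly Set.discard
    let odd : PySem.Set Char :=
      s.toList.foldl (fun st ch =>
        if PySem.Set.contains st ch then PySem.Set.discard st ch
        else PySem.Set.add st ch) PySem.Set.empty
    PySem.Set.len odd ≤ k

-- ===== PRECONDITION & SPEC =====
def Spec_canConstruct (s : String) (k : Int) (out : Bool) : Prop := out = canConstruct_alt s k
instance (s : String) (k : Int) (out : Bool) : Decidable (Spec_canConstruct s k out) := by unfold Spec_canConstruct; infer_instance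

-- ===== CLAIM (what is proved, stated in full; the proofs are below) =====
def Claim_equal_canConstruct : Prop := ∀ (s : String) (k : Int), Dom_canConstruct s k → Spec_canConstruct s k (canConstruct s k)

-- ===== LEMMAS AND PROOFS =====

-- ===== VERDICT (by name: the statement is the Claim_ definition above) =====
-- The toggling step of B's loop
def pvStep (st : PySem.Set Char) (ch : Char) : PySem.Set Char :=
  if PySem.Set.contains st ch then PySem.Set.discard st ch else PySem.Set.add st ch

lemma pvStep_nodup (st : List Char) (ch : Char) (h : st.Nodup) : (pvStep st ch).Nodup := by
  unfold pvStep; split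
  · exact PySem.Set.nodup_discard st ch h
  · exact PySem.Set.nodup_add st ch h

lemma pvStep_mem (st : List Char) (ch x : Char) :
    x ∈ pvStep st ch ↔ (x ∈ st ∧ x ≠ ch) ∨ (x ∉ st ∧ x = ch) := by
  unfold pvStep
  by_cases hc : PySem.Set.contains st ch
  · have hch : ch ∈ st := (PySem.Set.contains_iff st ch).1 hc
    rw [if_pos hc, PySem.Set.mem_discard]
    constructor
    · exact fun ⟨h1, h2⟩ => Or.inl ⟨h1, h2⟩
    · rintro (⟨h1, h2⟩ | ⟨h1, h2⟩)
      · exact ⟨h1, h2⟩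
      · exact absurd (h2 ▸ hch) h1
  · have hch : ch ∉ st := fun hm => hc ((PySem.Set.contains_iff st ch).2 hm)
    rw [if_neg hc, PySem.Set.mem_add]
    constructor
    · rintro (h1 | h1)
      · exact Or.inl ⟨h1, fun he => hch (he ▸ h1)⟩
      · exact Or.inr ⟨h1 ▸ hch, h1⟩
    · rintro (⟨h1, _⟩ | ⟨_, h1⟩)
      · exact Or.inl h1
      · exact Or.inr h1

-- Invariant of B's parity-toggling loop
lemma pvToggle_inv (t : List Char) : ∀ (st : List Char), st.Nodup →
    (t.foldl pvStep st).Nodup ∧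
    (∀ x, x ∈ t.foldl pvStep st ↔
      ((x ∈ st ∧ t.count x % 2 = 0) ∨ (x ∉ st ∧ t.count x % 2 = 1))) := by
  induction t with
  | nil =>
    intro st h
    refine ⟨h, fun x => ?_⟩
    simp
  | cons ch t ih =>
    intro st h
    obtain ⟨hn, hm⟩ := ih (pvStep st ch) (pvStep_nodup st ch h)
    refine ⟨hn, fun x => ?_⟩
    rw [List.foldl_cons, hm x, pvStep_mem st ch x]
    by_cases hx : x = ch
    · subst hx
      rw [List.count_cons_self]
      have hp : t.count x % 2 = 0 ∨ t.count x % 2 = 1 := Nat.mod_two_eq_zero_or_one _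
      have hne : ¬ (t.count x % 2 = 0 ∧ t.count x % 2 = 1) := by omega
      have hp1 : (t.count x + 1) % 2 = 0 ↔ t.count x % 2 = 1 := by omega
      have hp2 : (t.count x + 1) % 2 = 1 ↔ t.count x % 2 = 0 := by omega
      rw [hp1, hp2]
      have hrfl : x = x := rfl
      tauto
    · rw [List.count_cons_of_ne (fun a => hx (id (Eq.symm a)))]
      constructor
      · rintro (⟨(⟨h1, _⟩ | ⟨_, h2⟩), h3⟩ | ⟨h1, h3⟩)
        · exact Or.inl ⟨h1, h3⟩
        · exact absurd h2 hx
        · exact Or.inr ⟨fun hmem => h1 (Or.inl ⟨hmem, hx⟩), h3⟩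
      · rintro (⟨h1, h3⟩ | ⟨h1, h3⟩)
        · exact Or.inl ⟨Or.inl ⟨h1, hx⟩, h3⟩
        · refine Or.inr ⟨?_, h3⟩
          rintro (⟨h4, _⟩ | ⟨_, h4⟩)
          · exact h1 h4
          · exact hx h4

-- A's counting loop over the values is length of the odd filter
lemma pvFoldlCount (p : Int → Bool) (vs : List Int) (acc : Int) :
    vs.foldl (fun acc v => if p v then acc + 1 else acc) acc
      = acc + ((vs.filter p).length : Int) := by
  induction vs generalizing acc with
  | nil => simp
  | cons v t ih =>
    simp only [List.foldl_cons, List.filter_cons]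
    by_cases h : p v
    · simp [h, ih]; omega
    · simp [h, ih]

-- A's dict-building loop is PySem.Dict.counter
lemma pvFreq_eq_counter (l : List Char) :
    l.foldl (fun d ch =>
        if d.contains ch then d.insert ch (d.getD ch 0 + 1)
        else d.insert ch 1) PySem.Dict.empty = PySem.Dict.counter l := by
  rw [← PySem.Dict.foldl_insert_getD_add_one_eq_counter]
  congr 1
  funext d ch
  by_cases h : d.contains ch
  · simp [h]
  · have h' : d.contains ch = false := by simpa using h
    rw [if_neg h, PySem.Dict.getD_of_not_contains d 0 h', zero_add]

-- Both loops produce the same odd-parity count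
lemma pvLen_eq (l : List Char) :
    ((((PySem.Dict.counter l).values).filter (fun v => v % 2 != 0)).length : Int)
      = PySem.Set.len (l.foldl pvStep PySem.Set.empty) := by
  have hvals : (PySem.Dict.counter l).values
      = (PySem.Set.ofList l).map (fun k => (l.count k : Int)) := by
    show ((PySem.Dict.counter l).items).map (·.2) = _
    rw [PySem.Dict.items_counter]
    simp
  rw [hvals, List.filter_map, List.length_map]
  obtain ⟨hnd, hmem⟩ := pvToggle_inv l [] List.nodup_nil
  have hfn : (List.filter ((fun v => v % 2 != 0) ∘ fun k => (l.count k : Int)) (PySem.Set.ofList l))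
      = (PySem.Set.ofList l).filter (fun c => decide (l.count c % 2 = 1)) := by
    apply List.filter_congr
    intro c _
    rw [Bool.eq_iff_iff]
    simp only [Function.comp_apply, bne_iff_ne, ne_eq, decide_eq_true_eq]
    omega
  rw [hfn]
  have hperm : ((PySem.Set.ofList l).filter (fun c => decide (l.count c % 2 = 1))).Perm
      (l.foldl pvStep PySem.Set.empty) := by
    refine (List.perm_ext_iff_of_nodup (List.Nodup.filter _ (PySem.Set.nodup_ofList l)) hnd).2 ?_
    intro x
    rw [List.mem_filter, hmem x, PySem.Set.mem_ofList]
    constructor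
    · rintro ⟨_, h2⟩
      exact Or.inr ⟨List.not_mem_nil, by simpa using h2⟩
    · rintro (⟨hx, _⟩ | ⟨_, h2⟩)
      · exact absurd hx List.not_mem_nil
      · exact ⟨List.count_pos_iff.1 (by omega), by simpa using h2⟩
  rw [hperm.length_eq]
  rfl

-- ===== VERDICT (by name: the statement is the Claim_ definition above) =====
theorem canConstruct_spec : Claim_equal_canConstruct := by
  intro s k _
  unfold Spec_canConstruct canConstruct canConstruct_alt
  split_ifs
  · rfl
  · rfl
  · have h := pvLen_eq s.toList
    rw [pvFreq_eq_counter s.toList]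
    show (if (((PySem.Dict.counter s.toList).values).foldl
        (fun acc v => if v % 2 != 0 then acc + 1 else acc) 0) > k then false else true)
      = decide (PySem.Set.len (s.toList.foldl pvStep PySem.Set.empty) ≤ k)
    rw [pvFoldlCount, zero_add, h]
    by_cases hk : PySem.Set.len (s.toList.foldl pvStep PySem.Set.empty) ≤ k
    · rw [if_neg (by omega), decide_eq_true hk]
    · rw [if_pos (by omega), decide_eq_false hk]
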